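-- pv_equiv track=rewrite | github.com/ChunBoo/JustUK | Math/386-minStepsWithLimits.py | f
-- ===== SOURCE A (Python) =====
-- def f(n,m):
--     if n==1:
--         return 0
--     if m>0 and n&1==0:
--         return 1+f(n//2,m-1)
--     if m==0:
--         return n-1
--     if m>0 and n&1:
--         return 1+f(n-1,m)
-- ===== SOURCE B (Python) =====
-- def f(n, m):
--     # closed form over n's binary digits: each of the t = min(m, bit_length-1)
--     # halvings costs 1 plus 1 for each low set bit stripped first; the remainder
--     # r = n >> t is finished by r-1 decrements.
--     ones = bin(n).count('1')
--     L = n.bit_length() - 1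
--     t = min(m, L)
--     if t <= 0:
--         return n - 1
--     r = n >> t
--     return t + ones - bin(r).count('1') + r - 1
-- ===== Notes on version B (the rewrite author's own statement) =====
-- stated objective: alternative
-- what changed: Replaced A's step-by-step recursion (halve when even, decrement when odd) by a closed form over n's binary representation: t = min(m, bit_length-1) halvings cost t plus the stripped low set bits (popcount difference), and the remainder n>>t is finished by n>>t - 1 decrements.
-- outside the precondition, e.g. on f(0, 3): A returns 2, B returns -1; on f(5, -1): A returns None, B returns 4; on f(0, 100000): A raises RecursionError, B returns -1
import Mathlib
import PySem

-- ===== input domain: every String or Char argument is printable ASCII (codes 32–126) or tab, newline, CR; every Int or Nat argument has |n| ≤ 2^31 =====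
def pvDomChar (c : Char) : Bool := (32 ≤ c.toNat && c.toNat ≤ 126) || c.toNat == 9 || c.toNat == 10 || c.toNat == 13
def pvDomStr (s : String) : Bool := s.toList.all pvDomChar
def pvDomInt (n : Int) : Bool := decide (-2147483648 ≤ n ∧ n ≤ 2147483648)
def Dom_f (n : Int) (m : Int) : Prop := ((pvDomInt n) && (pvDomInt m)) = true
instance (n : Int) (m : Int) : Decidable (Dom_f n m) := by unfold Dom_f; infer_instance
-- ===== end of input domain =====

-- B replaces A's step-by-step recursion by a closed form over n's binary digits
-- (bit_length / popcount); objective: alternative algorithm, no speed claim.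

-- ===== PORT A =====
-- literal transliteration of A's recursion; `n&1` is ported as `mod n 2` (equal for
-- divisor 2); the final `0` stands for Python's implicit `return None` (m < 0 with
-- n ≠ 1), excluded by Pre_f
def f (n : Int) (m : Int) : Int :=
  if n = 1 then 0
  else if m > 0 ∧ PySem.Int.mod n 2 = 0 then 1 + f (PySem.Int.floordiv n 2) (m - 1)
  else if m = 0 then n - 1
  else if m > 0 ∧ PySem.Int.mod n 2 ≠ 0 then 1 + f (n - 1) m
  else 0
termination_by 2 * m.toNat + (if PySem.Int.mod n 2 = 0 then 0 else 1)
decreasing_by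
  · split <;> omega
  · have hnd : ¬ (2 ∣ n) := by
      intro hd
      have := (PySem.Int.mod_eq_zero_iff_dvd n 2).mpr hd
      tauto
    have hd1 : (2:Int) ∣ n - 1 := by
      have h := PySem.Int.mod_nonneg n (b := 2) (by omega)
      have h2 := PySem.Int.mod_lt n (b := 2) (by omega)
      have hne1 : PySem.Int.mod n 2 = 1 := by
        have : PySem.Int.mod n 2 ≠ 0 := fun h3 => hnd ((PySem.Int.mod_eq_zero_iff_dvd n 2).mp h3)
        omega
      have := PySem.Int.floordiv_mul_add_mod n 2
      exact ⟨PySem.Int.floordiv n 2, by omega⟩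
    simp [hnd, hd1]

-- ===== PORT B =====
-- transliteration of Source B's closed form: bin(n).count('1') → PySem.Int.bitCount,
-- n.bit_length() → PySem.Int.bitLength, n >> t → Lean's `>>>` (t > 0 in that branch)
def f_alt (n : Int) (m : Int) : Int :=
  let ones : Int := PySem.Int.bitCount n
  let L : Int := (PySem.Int.bitLength n : Int) - 1
  let t : Int := min m L
  if t ≤ 0 then n - 1
  else
    let r : Int := n >>> t.toNat
    t + ones - PySem.Int.bitCount r + r - 1

-- ===== PRECONDITION & SPEC =====
-- Pre_f restricts to the natural domain n ≥ 1 and excludes m < 0 with n ≠ 1, where A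
-- falls through every branch and returns None (not an int). Outside the natural
-- domain (n ≤ 0) A recurses on a nonpositive n: it raises RecursionError for large m
-- and for small m returns a value B does not reproduce (see cites).
def Pre_f (n : Int) (m : Int) : Prop := 1 ≤ n ∧ (0 ≤ m ∨ n = 1)
instance (n : Int) (m : Int) : Decidable (Pre_f n m) := by unfold Pre_f; infer_instance
def pvWitness_f : Int × Int := (7, 2)

def Spec_f (n : Int) (m : Int) (out : Int) : Prop := out = f_alt n m
instance (n : Int) (m : Int) (out : Int) : Decidable (Spec_f n m out) := by unfold Spec_f; infer_instance

-- ===== CLAIM (what is proved, stated in full; the proofs are below) =====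
def Claim_equal_f : Prop := ∀ (n : Int) (m : Int), Dom_f n m → Pre_f n m → Spec_f n m (f n m)

-- ===== LEMMAS AND PROOFS =====

theorem shiftRight_one_eq_floordiv (n : Int) : n >>> (1:Nat) = PySem.Int.floordiv n 2 := by
  rw [Int.shiftRight_eq_div_pow, PySem.Int.floordiv_eq_ediv_of_pos (by norm_num)]; norm_num

theorem bitLength_ge_one (n : Int) (h : 0 < n) : 1 ≤ (PySem.Int.bitLength n : Int) := by
  rw [PySem.Int.bitLength_of_pos h]; push_cast; omega

theorem floordiv_two_pos (n : Int) (h : 2 ≤ n) : 0 < PySem.Int.floordiv n 2 := by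
  have := PySem.Int.floordiv_mul_add_mod n 2
  have h1 := PySem.Int.mod_nonneg n (b := 2) (by omega)
  have h2 := PySem.Int.mod_lt n (b := 2) (by omega)
  omega

theorem f_alt_one (m : Int) : f_alt 1 m = 0 := by
  simp only [f_alt]
  have hb : PySem.Int.bitLength (1:Int) = 1 := by decide
  rw [hb]
  split_ifs with hcf
  · norm_num
  · exfalso; omega

-- closed-form step, even case: one halving
theorem even_step (n m : Int) (h2 : 2 ≤ n) (hm : 1 ≤ m) (hev : PySem.Int.mod n 2 = 0) :
    1 + f_alt (PySem.Int.floordiv n 2) (m - 1) = f_alt n m := by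
  set h := PySem.Int.floordiv n 2 with hh
  have hh1 : 1 ≤ h := floordiv_two_pos n h2
  have hB : 1 ≤ (PySem.Int.bitLength h : Int) := bitLength_ge_one h (by omega)
  have hbl : (PySem.Int.bitLength n : Int) = (PySem.Int.bitLength h : Int) + 1 := by
    rw [PySem.Int.bitLength_of_pos (show (0:Int) < n by omega)]; push_cast; ring
  have hbc : ((PySem.Int.bitCount n : Int)) = (PySem.Int.bitCount h : Int) := by
    rw [PySem.Int.bitCount_of_pos (show (0:Int) < n by omega), hev]; push_cast; ring
  simp only [f_alt]
  rw [hbl, hbc]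
  by_cases hc1 : min (m - 1) ((PySem.Int.bitLength h : Int) - 1) ≤ 0
  · rw [if_pos hc1, if_neg (show ¬ min m ((PySem.Int.bitLength h : Int) + 1 - 1) ≤ 0 by omega)]
    have ht : min m ((PySem.Int.bitLength h : Int) + 1 - 1) = 1 := by omega
    rw [ht]
    have hsh : n >>> ((1:Int)).toNat = h := by
      have h1n : ((1:Int)).toNat = 1 := rfl
      rw [h1n, shiftRight_one_eq_floordiv, hh]
    rw [hsh]
    ring
  · rw [if_neg hc1, if_neg (show ¬ min m ((PySem.Int.bitLength h : Int) + 1 - 1) ≤ 0 by omega)]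
    have hts : min m ((PySem.Int.bitLength h : Int) + 1 - 1)
        = min (m - 1) ((PySem.Int.bitLength h : Int) - 1) + 1 := by omega
    rw [hts]
    have hsh : n >>> (min (m - 1) ((PySem.Int.bitLength h : Int) - 1) + 1).toNat
        = h >>> (min (m - 1) ((PySem.Int.bitLength h : Int) - 1)).toNat := by
      have hsp : (min (m - 1) ((PySem.Int.bitLength h : Int) - 1) + 1).toNat
          = 1 + (min (m - 1) ((PySem.Int.bitLength h : Int) - 1)).toNat := by omega
      rw [hsp, Int.shiftRight_add, shiftRight_one_eq_floordiv, hh]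
    rw [hsh]
    ring

-- closed-form step, odd case: strip the low bit
theorem odd_step (n m : Int) (h3 : 3 ≤ n) (hm : 1 ≤ m) (hodd : PySem.Int.mod n 2 = 1) :
    1 + f_alt (n - 1) m = f_alt n m := by
  set h := PySem.Int.floordiv n 2 with hh
  have hsum : h * 2 + PySem.Int.mod n 2 = n := PySem.Int.floordiv_mul_add_mod n 2
  have hh1 : 1 ≤ h := by omega
  have hB : 1 ≤ (PySem.Int.bitLength h : Int) := bitLength_ge_one h (by omega)
  have hfd : PySem.Int.floordiv (n - 1) 2 = h :=
    (PySem.Int.floordiv_eq_iff_of_pos (by omega)).mpr ⟨by omega, by omega⟩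
  have hmod1 : PySem.Int.mod (n - 1) 2 = 0 := by
    rw [PySem.Int.mod_eq_zero_iff_dvd]; exact ⟨h, by omega⟩
  have hbl : (PySem.Int.bitLength n : Int) = (PySem.Int.bitLength h : Int) + 1 := by
    rw [PySem.Int.bitLength_of_pos (show (0:Int) < n by omega)]; push_cast; ring
  have hbl1 : (PySem.Int.bitLength (n - 1) : Int) = (PySem.Int.bitLength h : Int) + 1 := by
    rw [PySem.Int.bitLength_of_pos (show (0:Int) < n - 1 by omega), hfd]; push_cast; ring
  have hbc : ((PySem.Int.bitCount n : Int)) = (PySem.Int.bitCount h : Int) + 1 := by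
    rw [PySem.Int.bitCount_of_pos (show (0:Int) < n by omega), hodd]; push_cast; ring
  have hbc1 : ((PySem.Int.bitCount (n - 1) : Int)) = (PySem.Int.bitCount h : Int) := by
    rw [PySem.Int.bitCount_of_pos (show (0:Int) < n - 1 by omega), hfd, hmod1]; push_cast; ring
  simp only [f_alt]
  rw [hbl, hbl1, hbc, hbc1]
  have hne0 : ¬ min m ((PySem.Int.bitLength h : Int) + 1 - 1) ≤ 0 := by omega
  rw [if_neg hne0, if_neg hne0]
  have hsh : n >>> (min m ((PySem.Int.bitLength h : Int) + 1 - 1)).toNat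
      = (n - 1) >>> (min m ((PySem.Int.bitLength h : Int) + 1 - 1)).toNat := by
    have hsp : (min m ((PySem.Int.bitLength h : Int) + 1 - 1)).toNat
        = 1 + (min m ((PySem.Int.bitLength h : Int) + 1 - 1) - 1).toNat := by omega
    rw [hsp, Int.shiftRight_add, Int.shiftRight_add,
        shiftRight_one_eq_floordiv, shiftRight_one_eq_floordiv, hfd, ← hh]
  rw [hsh]
  ring

-- Main lemma: on the natural domain A's recursion computes B's closed form.
theorem f_eq_closed : ∀ (n m : Int), 1 ≤ n → (0 ≤ m ∨ n = 1) → f n m = f_alt n m := by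
  intro n m
  induction n, m using f.induct with
  | case1 m =>
    intro _ _
    rw [f, if_pos rfl, f_alt_one]
  | case2 n m hne hc ih =>
    intro h1 _
    obtain ⟨hm, hev⟩ := hc
    have hn2 : 2 ≤ n := by
      rcases (PySem.Int.mod_eq_zero_iff_dvd n 2).mp hev with ⟨k, hk⟩
      omega
    have hh1 : (1:Int) ≤ PySem.Int.floordiv n 2 := floordiv_two_pos n hn2
    rw [f, if_neg hne, if_pos ⟨hm, hev⟩, ih hh1 (Or.inl (by omega)),
        even_step n m hn2 (by omega) hev]
  | case3 n hne hc =>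
    intro h1 _
    have hn2 : 2 ≤ n := by omega
    rw [f, if_neg hne, if_neg hc, if_pos rfl, f_alt]
    have hL : 1 ≤ (PySem.Int.bitLength n : Int) := bitLength_ge_one n (by omega)
    rw [if_pos (by omega : min (0:Int) ((PySem.Int.bitLength n : Int) - 1) ≤ 0)]
  | case4 n m hne hc hm0 hc2 ih =>
    intro h1 _
    obtain ⟨hm, hodd⟩ := hc2
    have hmod : PySem.Int.mod n 2 = 1 := by
      have h0 := PySem.Int.mod_nonneg n (b := 2) (by omega)
      have h2 := PySem.Int.mod_lt n (b := 2) (by omega)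
      omega
    have hn3 : 3 ≤ n := by
      rcases lt_trichotomy n 2 with h | h | h
      · -- n = 1 excluded, n ≤ 1 with 1 ≤ n forces n = 1
        exfalso; exact hne (by omega)
      · exfalso; rw [h] at hmod; exact absurd hmod (by decide)
      · omega
    rw [f, if_neg hne, if_neg hc, if_neg hm0, if_pos ⟨hm, hodd⟩,
        ih (by omega) (Or.inl (by omega)), odd_step n m hn3 (by omega) hmod]
  | case5 n m hne hc hm0 hc2 =>
    intro h1 h2
    exfalso
    rcases h2 with h2 | h2
    · rcases lt_trichotomy m 0 with h | h | h
      · omega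
      · exact hm0 h
      · by_cases hev : PySem.Int.mod n 2 = 0
        · exact hc ⟨h, hev⟩
        · exact hc2 ⟨h, hev⟩
    · exact hne h2

-- ===== VERDICT (by name: the statement is the Claim_ definition above) =====
theorem f_spec : Claim_equal_f := by
  intro n m _ hpre
  unfold Spec_f
  exact f_eq_closed n m hpre.1 hpre.2
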